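-- pv_equiv track=rewrite | github.com/Xiaoyu-Tao/AnomaMind-TS | scripts/eval.py | convert_points_to_intervals
-- ===== SOURCE A (Python) =====
-- from typing import Dict, List, Tuple, Set, Optional, Union
--
-- def convert_points_to_intervals(points: Set[int]) -> List[Tuple[int, int]]:
--     """Convert point set to interval list (merge consecutive points)."""
--     if not points:
--         return []
--     sorted_points = sorted(points)
--     intervals = []
--     start = end = sorted_points[0]
--     for point in sorted_points[1:]:
--         if point == end + 1:
--             end = point
--         else:
--             intervals.append((start, end))
--             start = end = point
--     intervals.append((start, end))
--     return intervals
-- ===== SOURCE B (Python) =====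
-- def convert_points_to_intervals(points):
--     """Convert point set to interval list (merge consecutive points)."""
--     starts = sorted(p for p in points if p - 1 not in points)
--     ends = sorted(p for p in points if p + 1 not in points)
--     return list(zip(starts, ends))
-- ===== Notes on version B (the rewrite author's own statement) =====
-- stated objective: alternative
-- what changed: Replaces the sort-then-merge scan with run-boundary detection: a point starts a run iff p-1 is not in the set and ends one iff p+1 is not, so zipping the sorted starts with the sorted ends yields the intervals with no running-merge state.
import Mathlib
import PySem

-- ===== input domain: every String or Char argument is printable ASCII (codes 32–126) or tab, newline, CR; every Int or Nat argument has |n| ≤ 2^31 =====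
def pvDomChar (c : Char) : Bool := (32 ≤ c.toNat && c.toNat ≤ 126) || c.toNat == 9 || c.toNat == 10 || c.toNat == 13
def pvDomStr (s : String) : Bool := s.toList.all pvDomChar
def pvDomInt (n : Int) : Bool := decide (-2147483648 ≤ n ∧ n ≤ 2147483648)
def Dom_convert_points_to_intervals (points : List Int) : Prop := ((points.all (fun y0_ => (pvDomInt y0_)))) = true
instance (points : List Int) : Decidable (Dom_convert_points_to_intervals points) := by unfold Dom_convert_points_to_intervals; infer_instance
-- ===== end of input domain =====

-- B replaces A's sort-then-merge scan by boundary detection (a run starts at p iff p-1 is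
-- not in the set, ends at p iff p+1 is not) and zips the sorted starts with the sorted ends;
-- objective: alternative (same asymptotic cost, no running-merge state).


-- ===== PORT A =====
def convert_points_to_intervals (points : List Int) : List (Int × Int) :=
  if points = [] then []
  else
    let sorted_points := PySem.List.sorted points (fun x => x) false
    match sorted_points with
    | [] => []
    | p0 :: rest =>
      -- intervals, start, end carried through the loop over sorted_points[1:]
      let st := rest.foldl
        (fun (acc : List (Int × Int) × Int × Int) point =>
          if point = acc.2.2 + 1 then (acc.1, acc.2.1, point)
          else (acc.1 ++ [(acc.2.1, acc.2.2)], point, point))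
        ([], p0, p0)
      st.1 ++ [(st.2.1, st.2.2)]

-- ===== PORT B =====
def convert_points_to_intervals_alt (points : List Int) : List (Int × Int) :=
  let starts := PySem.List.sorted (points.filter (fun p => !points.contains (p - 1))) (fun x => x) false
  let ends := PySem.List.sorted (points.filter (fun p => !points.contains (p + 1))) (fun x => x) false
  starts.zip ends

-- ===== PRECONDITION & SPEC =====
-- The Python parameter is a Set[int]; under the type convention its List encoding holds the
-- DISTINCT elements, so Pre_ states exactly that (no input a Python caller can form is excluded).
def Pre_convert_points_to_intervals (points : List Int) : Prop := points.Nodup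
instance (points : List Int) : Decidable (Pre_convert_points_to_intervals points) := by unfold Pre_convert_points_to_intervals; infer_instance
def pvWitness_convert_points_to_intervals : List Int := [5, 1, 2, 9, 3]
def Spec_convert_points_to_intervals (points : List Int) (out : List (Int × Int)) : Prop := out = convert_points_to_intervals_alt points
instance (points : List Int) (out : List (Int × Int)) : Decidable (Spec_convert_points_to_intervals points out) := by unfold Spec_convert_points_to_intervals; infer_instance

-- ===== CLAIM (what is proved, stated in full; the proofs are below) =====
def Claim_equal_convert_points_to_intervals : Prop := ∀ (points : List Int), Dom_convert_points_to_intervals points → Pre_convert_points_to_intervals points → Spec_convert_points_to_intervals points (convert_points_to_intervals points)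

-- ===== LEMMAS AND PROOFS =====

-- A's merge scan, written as structural recursion over the remaining sorted points.
def runsFrom (start e : Int) : List Int → List (Int × Int)
  | [] => [(start, e)]
  | p :: ps => if p = e + 1 then runsFrom start p ps else (start, e) :: runsFrom p p ps

-- A's foldl loop computes runsFrom (accumulator pulled out front).
theorem foldl_runsFrom (l : List Int) (acc : List (Int × Int)) (start e : Int) :
    ((l.foldl
        (fun (acc : List (Int × Int) × Int × Int) point =>
          if point = acc.2.2 + 1 then (acc.1, acc.2.1, point)
          else (acc.1 ++ [(acc.2.1, acc.2.2)], point, point))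
        (acc, start, e)).1
      ++ [((l.foldl
        (fun (acc : List (Int × Int) × Int × Int) point =>
          if point = acc.2.2 + 1 then (acc.1, acc.2.1, point)
          else (acc.1 ++ [(acc.2.1, acc.2.2)], point, point))
        (acc, start, e)).2.1,
        (l.foldl
        (fun (acc : List (Int × Int) × Int × Int) point =>
          if point = acc.2.2 + 1 then (acc.1, acc.2.1, point)
          else (acc.1 ++ [(acc.2.1, acc.2.2)], point, point))
        (acc, start, e)).2.2)]) = acc ++ runsFrom start e l := by
  induction l generalizing acc start e with
  | nil => simp [runsFrom]
  | cons p ps ih =>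
    simp only [List.foldl_cons, runsFrom]
    by_cases h : p = e + 1
    · simp only [h]
      exact ih acc start (e + 1)
    · simp only [if_neg h]
      rw [ih]
      simp

-- Core: on a strictly increasing tail whose elements are exactly the members of S above e,
-- the merge scan equals the zip of run starts with run ends.
theorem runsFrom_eq_zip (S : List Int) (l : List Int) (start e : Int)
    (hpw : (e :: l).Pairwise (· < ·)) (heS : e ∈ S)
    (hmem : ∀ x, x ∈ l ↔ (x ∈ S ∧ e < x)) :
    runsFrom start e l =
      (start :: l.filter (fun p => !S.contains (p - 1))).zip
        ((e :: l).filter (fun p => !S.contains (p + 1))) := by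
  induction l generalizing start e with
  | nil =>
    have hnot : (e + 1) ∉ S := fun h => by
      have := (hmem (e + 1)).2 ⟨h, by omega⟩; simp at this
    simp [runsFrom, List.filter, List.contains_eq_mem, hnot]
  | cons p ps ih =>
    have hep : e < p := (List.pairwise_cons.1 hpw).1 p (by simp)
    have hpw' : (p :: ps).Pairwise (· < ·) := (List.pairwise_cons.1 hpw).2
    have hps_gt : ∀ x ∈ ps, p < x := (List.pairwise_cons.1 hpw').1
    have hpS : p ∈ S := ((hmem p).1 (by simp)).1
    have hmem' : ∀ x, x ∈ ps ↔ (x ∈ S ∧ p < x) := by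
      intro x
      constructor
      · intro hx
        exact ⟨((hmem x).1 (by simp [hx])).1, hps_gt x hx⟩
      · rintro ⟨hxS, hpx⟩
        have : x ∈ p :: ps := (hmem x).2 ⟨hxS, by omega⟩
        rcases List.mem_cons.1 this with h | h
        · omega
        · exact h
    by_cases h : p = e + 1
    · -- run continues: p is not a start (p-1 = e ∈ S), e is not an end (e+1 = p ∈ S)
      subst h
      rw [runsFrom, if_pos rfl, ih start (e + 1) hpw' hpS hmem']
      simp [List.filter_cons, List.contains_eq_mem, heS, hpS]
    · -- gap: p starts a new run, e ends the current one
      have hgap : e + 1 < p := by omega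
      have hs : p - 1 ∉ S := by
        intro hin
        have : p - 1 ∈ p :: ps := (hmem (p - 1)).2 ⟨hin, by omega⟩
        rcases List.mem_cons.1 this with hh | hh
        · omega
        · have := hps_gt _ hh; omega
      have he : e + 1 ∉ S := by
        intro hin
        have : e + 1 ∈ p :: ps := (hmem (e + 1)).2 ⟨hin, by omega⟩
        rcases List.mem_cons.1 this with hh | hh
        · omega
        · have := hps_gt _ hh; omega
      simp only [runsFrom, if_neg h]
      rw [ih p p hpw' hpS hmem']
      simp [List.filter_cons, List.contains_eq_mem, hs, he]

-- filter commutes with sorting a nodup list: sorted(filter f points) = filter f (sorted points)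
theorem sorted_filter_eq (points : List Int) (hnd : points.Nodup) (f : Int → Bool) :
    PySem.List.sorted (points.filter f) (fun x => x) false
      = (PySem.List.sorted points (fun x => x) false).filter f := by
  apply PySem.List.sorted_eq_of_perm_of_pairwise_lt
  · exact (PySem.List.sorted_perm points (fun x => x) false).filter f
  · have hle := PySem.List.sorted_pairwise points (fun x => x)
    have hnd' : (PySem.List.sorted points (fun x => x) false).Nodup :=
      (PySem.List.sorted_perm points (fun x => x) false).nodup_iff.2 hnd
    have hlt : (PySem.List.sorted points (fun x => x) false).Pairwise (· < ·) :=
      (hle.and hnd').imp (by rintro a b ⟨h1, h2⟩; omega)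
    exact hlt.sublist List.filter_sublist

-- ===== VERDICT (by name: the statement is the Claim_ definition above) =====
theorem convert_points_to_intervals_spec : Claim_equal_convert_points_to_intervals := by
  intro points _ hnd
  unfold Spec_convert_points_to_intervals convert_points_to_intervals convert_points_to_intervals_alt
  by_cases hnil : points = []
  · simp [hnil, PySem.List.sorted]
  · simp only [if_neg hnil]
    have hperm := PySem.List.sorted_perm points (fun x => x) false
    have hnd' : (PySem.List.sorted points (fun x => x) false).Nodup := hperm.nodup_iff.2 hnd
    have hlt : (PySem.List.sorted points (fun x => x) false).Pairwise (· < ·) :=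
      ((PySem.List.sorted_pairwise points (fun x => x)).and hnd').imp (by rintro a b ⟨h1, h2⟩; omega)
    cases hs : PySem.List.sorted points (fun x => x) false with
    | nil =>
      exact absurd ((PySem.List.sorted_eq_nil_iff points (fun x => x) false).1 hs) hnil
    | cons p0 rest =>
      rw [hs] at hperm hnd' hlt
      have hmemS : ∀ x, x ∈ points ↔ x ∈ p0 :: rest := fun x => (hperm.mem_iff).symm
      have hrest : ∀ x, x ∈ rest ↔ (x ∈ points ∧ p0 < x) := by
        intro x
        constructor
        · intro hx
          exact ⟨(hmemS x).2 (by simp [hx]), (List.pairwise_cons.1 hlt).1 x hx⟩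
        · rintro ⟨hxS, hpx⟩
          rcases List.mem_cons.1 ((hmemS x).1 hxS) with h | h
          · omega
          · exact h
      have hp0S : p0 ∈ points := (hmemS p0).2 (by simp)
      dsimp only
      rw [foldl_runsFrom rest [] p0 p0, List.nil_append,
        runsFrom_eq_zip points rest p0 p0 hlt hp0S hrest,
        sorted_filter_eq points hnd, sorted_filter_eq points hnd, hs]
      -- p0 is the minimum, so p0 - 1 ∉ points and p0 heads the starts filter
      have hp0start : p0 - 1 ∉ points := by
        intro hin
        rcases List.mem_cons.1 ((hmemS (p0 - 1)).1 hin) with h | h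
        · omega
        · have := (List.pairwise_cons.1 hlt).1 _ h; omega
      simp [List.filter_cons, List.contains_eq_mem, hp0start]
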